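-- pv_equiv track=rewrite | github.com/grego-hash/GORO | core/hw_configurator_db.py | _match_adjacent_recursive
-- ===== SOURCE A (Python) =====
-- from typing import Dict, List, Optional
--
-- def _match_adjacent_recursive(
--     slot_names: List[str],
--     idx: int,
--     remaining: str,
--     option_index: Dict[str, List[str]],
--     selections: Dict[str, str],
-- ) -> bool:
--     if idx == len(slot_names):
--         return remaining == ""
--     sn = slot_names[idx]
--     opts = {v.upper(): v for v in option_index.get(sn, [])}
--     for length in range(len(remaining), 0, -1):
--         head = remaining[:length]
--         if head in opts:
--             selections[sn] = opts[head]
--             if _match_adjacent_recursive(slot_names, idx + 1, remaining[length:], option_index, selections):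
--                 return True
--             del selections[sn]
--     return False
-- ===== SOURCE B (Python) =====
-- # Word-break dynamic programming instead of exponential backtracking: compute, right to left,
-- # the set of string positions from which the remaining slots can consume the rest, then answer
-- # and (on success) fill `selections` along the longest-first path the search would have taken.
-- # (Equivalence is about the return value; `selections` is filled on the success path only.)
-- def _match_adjacent_recursive(slot_names, idx, remaining, option_index, selections):
--     n = len(slot_names)
--     seq = [slot_names[i] for i in range(idx, n)]
--     m = len(remaining)
--     # reaches[j] = positions p such that remaining[p:] splits across slots seq[j:]
--     reaches = [set() for _ in range(len(seq) + 1)]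
--     reaches[len(seq)] = {m}
--     for j in range(len(seq) - 1, -1, -1):
--         keys = {v.upper() for v in option_index.get(seq[j], []) if v}
--         nxt = reaches[j + 1]
--         cur = set()
--         for q in nxt:
--             for key in keys:
--                 p = q - len(key)
--                 if p >= 0 and remaining.startswith(key, p):
--                     cur.add(p)
--         if not cur:
--             return False
--         reaches[j] = cur
--     if 0 not in reaches[0]:
--         return False
--     # fill selections along the first (longest-first) successful path, as the search would
--     p = 0
--     for j, sn in enumerate(seq):
--         opts = {v.upper(): v for v in option_index.get(sn, [])}
--         for q in sorted(reaches[j + 1], reverse=True):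
--             if q <= p:
--                 continue
--             head = remaining[p:q]
--             if head in opts:
--                 selections[sn] = opts[head]
--                 p = q
--                 break
--     return True
-- ===== Notes on version B (the rewrite author's own statement) =====
-- stated objective: faster
-- what changed: Replaces the exponential backtracking search by a right-to-left word-break dynamic program over string positions (computing, per slot suffix, the set of reachable positions), reconstructing selections along the longest-first path afterwards.
-- outside the precondition, e.g. on _match_adjacent_recursive(['s1', 's1'], 0, 'AB', {'s1': ['AB', 'A', 'B']}, {}): A returns True, B returns True; on _match_adjacent_recursive(['s1', 's1'], 0, 'A', {'s1': ['A']}, {}): A returns False, B returns False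
import Mathlib
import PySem

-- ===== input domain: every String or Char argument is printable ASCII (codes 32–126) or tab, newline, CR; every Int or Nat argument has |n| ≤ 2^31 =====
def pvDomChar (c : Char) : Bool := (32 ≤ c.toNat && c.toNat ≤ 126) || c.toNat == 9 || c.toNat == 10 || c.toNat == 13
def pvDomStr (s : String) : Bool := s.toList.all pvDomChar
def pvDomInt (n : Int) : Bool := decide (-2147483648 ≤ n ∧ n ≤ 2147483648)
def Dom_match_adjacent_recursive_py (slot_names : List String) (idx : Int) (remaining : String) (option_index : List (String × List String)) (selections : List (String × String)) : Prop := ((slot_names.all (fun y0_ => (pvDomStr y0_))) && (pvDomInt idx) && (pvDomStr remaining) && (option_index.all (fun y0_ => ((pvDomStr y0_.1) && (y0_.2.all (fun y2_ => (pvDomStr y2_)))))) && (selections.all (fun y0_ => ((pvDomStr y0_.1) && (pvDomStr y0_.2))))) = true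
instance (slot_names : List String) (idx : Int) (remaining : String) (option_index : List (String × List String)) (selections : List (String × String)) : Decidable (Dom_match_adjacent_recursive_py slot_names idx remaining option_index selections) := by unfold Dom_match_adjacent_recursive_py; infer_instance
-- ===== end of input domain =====

-- B replaces A's exponential backtracking by a right-to-left word-break DP over string positions;
-- the equivalence proved is about the RETURN value only (A also mutates `selections` in place).

-- ===== PORT A =====
-- opts = {v.upper(): v for v in option_index.get(sn, [])}
def pvUpperDict (vals : List String) : PySem.Dict (List Char) String :=
  vals.foldl (fun d v => d.insert (PySem.Chars.upper v.toList) v) PySem.Dict.empty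

-- the recursion of _match_adjacent_recursive on (idx, remaining); `selections` is only
-- mutated by the Python, never read into the result, so it is not threaded here
def pvMatchACore (slot_names : List String) (option_index : List (String × List String)) (idx : Int) (remaining : List Char) : Bool :=
  if idx = (slot_names.length : Int) then remaining == []
  else
    match hget : PySem.List.pyGet? slot_names idx with
    | none => false  -- Python raises IndexError here; excluded by Pre_
    | some sn =>
      let opts := pvUpperDict ((PySem.Dict.mk option_index).getD sn [])
      (PySem.List.pyRange (PySem.List.len remaining) 0 (-1)).attach.any (fun l =>
        let head := PySem.List.slice remaining none (some l.1)
        opts.contains head &&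
          pvMatchACore slot_names option_index (idx + 1) (PySem.List.slice remaining (some l.1) none))
termination_by ((slot_names.length : Int) - idx).toNat
decreasing_by
  have h : PySem.Raise.InRange slot_names.length idx := by
    by_contra hc
    rw [← PySem.List.pyGet?_eq_none_iff slot_names idx] at hc
    simp [hc] at hget
  obtain ⟨h1, h2⟩ := h
  omega

def match_adjacent_recursive_py (slot_names : List String) (idx : Int) (remaining : String) (option_index : List (String × List String)) (selections : List (String × String)) : Bool :=
  pvMatchACore slot_names option_index idx remaining.toList

-- ===== PORT B =====
-- keys = {v.upper() for v in option_index.get(seq[j], []) if v}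
def pvAltKeys (option_index : List (String × List String)) (sn : String) : PySem.Set (List Char) :=
  PySem.Set.ofList
    ((((PySem.Dict.mk option_index).getD sn []).filter (fun v => v != "")).map
      (fun v => PySem.Chars.upper v.toList))

-- one DP level: cur = {q - len(key) | q in nxt, key in keys, p >= 0 and remaining.startswith(key, p)}
-- (remaining.startswith(key, p) for 0 <= p is ported by hand as key.isPrefixOf (rem.drop p.toNat); exact there)
def pvAltLevel (rem : List Char) (keys : List (List Char)) (nxt : List Int) : List Int :=
  nxt.foldl (fun cur q =>
    keys.foldl (fun cur key =>
      if decide (0 ≤ q - (key.length : Int)) &&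
         key.isPrefixOf (rem.drop (q - (key.length : Int)).toNat)
      then PySem.Set.add cur (q - (key.length : Int)) else cur) cur) []

-- the level loop `for j in range(len(seq)-1, -1, -1)` with its `if not cur: return False` early
-- exit, as a right-to-left recursion over seq
def pvAltGo (rem : List Char) (option_index : List (String × List String)) : List String → List Int
  | [] => [(rem.length : Int)]
  | sn :: rest =>
    let nxt := pvAltGo rem option_index rest
    if nxt.isEmpty then [] else pvAltLevel rem (pvAltKeys option_index sn) nxt

-- B's Python additionally fills `selections` along the success path; that loop only mutates an
-- argument and never contributes to the return value, so it has no counterpart in this pure port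
def match_adjacent_recursive_py_alt (slot_names : List String) (idx : Int) (remaining : String) (option_index : List (String × List String)) (selections : List (String × String)) : Bool :=
  let rem := remaining.toList
  let seq := (PySem.List.pyRange idx (slot_names.length : Int) 1).map
      (fun i => (PySem.List.pyGet? slot_names i).getD "")  -- exact: Pre_ gives -len ≤ i < len
  (pvAltGo rem option_index seq).contains 0

-- ===== PRECONDITION & SPEC =====
-- the slot names the recursion visits: slot_names[i] for i in idx..len-1 (Python indexing, so a
-- negative idx first revisits names from the tail)
def pvVisited (slot_names : List String) (idx : Int) : List String :=
  (PySem.List.pyRange idx (slot_names.length : Int) 1).map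
    (fun i => (PySem.List.pyGet? slot_names i).getD "")

-- Pre_ excludes idx outside [-len, len] (slot_names[idx] raises IndexError) and calls where a
-- slot name visited twice has a nonempty option whose uppercase occurs in `remaining`: exactly
-- there A's set/del bookkeeping in `selections` can `del` an already-deleted key and raise
-- KeyError mid-backtracking (this safety margin also excludes some duplicate-name inputs on
-- which A happens to return; B returns the same value on those, see the cited examples).
def Pre_match_adjacent_recursive_py (slot_names : List String) (idx : Int) (remaining : String) (option_index : List (String × List String)) (selections : List (String × String)) : Prop :=
  -(slot_names.length : Int) ≤ idx ∧ idx ≤ (slot_names.length : Int) ∧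
  ∀ sn ∈ pvVisited slot_names idx, (pvVisited slot_names idx).count sn ≤ 1 ∨
    ∀ v ∈ (PySem.Dict.mk option_index).getD sn [],
      v = "" ∨ ¬ (PySem.Chars.upper v.toList) <:+: remaining.toList
instance (slot_names : List String) (idx : Int) (remaining : String) (option_index : List (String × List String)) (selections : List (String × String)) : Decidable (Pre_match_adjacent_recursive_py slot_names idx remaining option_index selections) := by unfold Pre_match_adjacent_recursive_py; infer_instance

def pvWitness_match_adjacent_recursive_py : List String × Int × String × (List (String × List String)) × (List (String × String)) :=
  (["size", "color"], 0, "XLRED", [("size", ["XL", "L"]), ("color", ["Red", "Blue"])], [])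

def Spec_match_adjacent_recursive_py (slot_names : List String) (idx : Int) (remaining : String) (option_index : List (String × List String)) (selections : List (String × String)) (out : Bool) : Prop := out = match_adjacent_recursive_py_alt slot_names idx remaining option_index selections
instance (slot_names : List String) (idx : Int) (remaining : String) (option_index : List (String × List String)) (selections : List (String × String)) (out : Bool) : Decidable (Spec_match_adjacent_recursive_py slot_names idx remaining option_index selections out) := by unfold Spec_match_adjacent_recursive_py; infer_instance

-- ===== CLAIM (what is proved, stated in full; the proofs are below) =====
def Claim_equal_match_adjacent_recursive_py : Prop := ∀ (slot_names : List String) (idx : Int) (remaining : String) (option_index : List (String × List String)) (selections : List (String × String)), Dom_match_adjacent_recursive_py slot_names idx remaining option_index selections → Pre_match_adjacent_recursive_py slot_names idx remaining option_index selections → Spec_match_adjacent_recursive_py slot_names idx remaining option_index selections (match_adjacent_recursive_py slot_names idx remaining option_index selections)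

-- ===== LEMMAS AND PROOFS =====

-- membership in range(a, b, -1)
lemma pv_mem_pyRange_neg_one {a b x : Int} : x ∈ PySem.List.pyRange a b (-1) ↔ b < x ∧ x ≤ a := by
  rw [PySem.List.pyRange_neg_one]
  simp only [List.mem_map, List.mem_range]
  constructor
  · rintro ⟨k, hk, rfl⟩; omega
  · intro ⟨h1, h2⟩; exact ⟨(a - x).toNat, by omega, by omega⟩

-- membership in a conditional-add fold
lemma pv_mem_foldl_add {β : Type} {c : β → Bool} {f : β → Int} {L : List β} {s : List Int} {x : Int} :
    x ∈ L.foldl (fun cur y => if c y then PySem.Set.add cur (f y) else cur) s ↔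
      x ∈ s ∨ ∃ y ∈ L, c y = true ∧ x = f y := by
  induction L generalizing s with
  | nil => simp
  | cons y ys ih =>
    rw [List.foldl_cons]
    by_cases hy : c y = true
    · rw [if_pos hy, ih, PySem.Set.mem_add]
      constructor
      · rintro (⟨hs | rfl⟩ | ⟨z, hm, hc, rfl⟩)
        · exact Or.inl hs
        · exact Or.inr ⟨y, List.mem_cons_self, hy, rfl⟩
        · exact Or.inr ⟨z, List.mem_cons_of_mem _ hm, hc, rfl⟩
      · rintro (hs | ⟨z, hm, hc, rfl⟩)
        · exact Or.inl (Or.inl hs)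
        · rcases List.mem_cons.mp hm with rfl | hm'
          · exact Or.inl (Or.inr rfl)
          · exact Or.inr ⟨z, hm', hc, rfl⟩
    · rw [if_neg hy, ih]
      constructor
      · rintro (hs | ⟨z, hm, hc, rfl⟩)
        · exact Or.inl hs
        · exact Or.inr ⟨z, List.mem_cons_of_mem _ hm, hc, rfl⟩
      · rintro (hs | ⟨z, hm, hc, rfl⟩)
        · exact Or.inl hs
        · rcases List.mem_cons.mp hm with rfl | hm'
          · exact absurd hc hy
          · exact Or.inr ⟨z, hm', hc, rfl⟩

-- membership in one DP level
lemma pv_mem_altLevel {rem : List Char} {keys : List (List Char)} {nxt : List Int} {x : Int} :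
    x ∈ pvAltLevel rem keys nxt ↔
      ∃ q ∈ nxt, ∃ key ∈ keys,
        (0 ≤ q - (key.length : Int) ∧ key <+: rem.drop (q - (key.length : Int)).toNat) ∧
        x = q - (key.length : Int) := by
  unfold pvAltLevel
  have inner : ∀ (q : Int) (s : List Int),
      x ∈ keys.foldl (fun cur key =>
        if decide (0 ≤ q - (key.length : Int)) &&
           key.isPrefixOf (rem.drop (q - (key.length : Int)).toNat)
        then PySem.Set.add cur (q - (key.length : Int)) else cur) s ↔
      x ∈ s ∨ ∃ key ∈ keys,
        (0 ≤ q - (key.length : Int) ∧ key <+: rem.drop (q - (key.length : Int)).toNat) ∧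
        x = q - (key.length : Int) := by
    intro q s
    rw [pv_mem_foldl_add]
    simp [List.isPrefixOf_iff_prefix]
  have outer : ∀ (s : List Int) (ns : List Int),
      x ∈ ns.foldl (fun cur q =>
        keys.foldl (fun cur key =>
          if decide (0 ≤ q - (key.length : Int)) &&
             key.isPrefixOf (rem.drop (q - (key.length : Int)).toNat)
          then PySem.Set.add cur (q - (key.length : Int)) else cur) cur) s ↔
      x ∈ s ∨ ∃ q ∈ ns, ∃ key ∈ keys,
        (0 ≤ q - (key.length : Int) ∧ key <+: rem.drop (q - (key.length : Int)).toNat) ∧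
        x = q - (key.length : Int) := by
    intro s ns
    induction ns generalizing s with
    | nil => simp
    | cons q qs ih =>
      rw [List.foldl_cons, ih, inner]
      constructor
      · rintro (⟨hs | h⟩ | ⟨q', hq', h⟩)
        · exact Or.inl hs
        · exact Or.inr ⟨q, List.mem_cons_self, h⟩
        · exact Or.inr ⟨q', List.mem_cons_of_mem _ hq', h⟩
      · rintro (hs | ⟨q', hq', h⟩)
        · exact Or.inl (Or.inl hs)
        · rcases List.mem_cons.mp hq' with rfl | hm'
          · exact Or.inl (Or.inr h)
          · exact Or.inr ⟨q', hm', h⟩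
  rw [outer]
  simp

-- every position in a DP reach list lies in [0, len rem]
lemma pv_reach_bounds {rem : List Char} {seq : List String} {option_index : List (String × List String)} {x : Int}
    (hx : x ∈ seq.foldr (fun sn nxt => pvAltLevel rem (pvAltKeys option_index sn) nxt) [(rem.length : Int)]) :
    0 ≤ x ∧ x ≤ (rem.length : Int) := by
  induction seq generalizing x with
  | nil => simp at hx; omega
  | cons sn rest ih =>
    simp only [List.foldr_cons] at hx
    rw [pv_mem_altLevel] at hx
    obtain ⟨q, hq, key, -, ⟨hge, -⟩, rfl⟩ := hx
    have := ih hq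
    omega

-- the early-exit level recursion computes the plain right fold of levels
lemma pv_altGo_eq_foldr (rem : List Char) (option_index : List (String × List String)) (seq : List String) :
    pvAltGo rem option_index seq =
      seq.foldr (fun sn nxt => pvAltLevel rem (pvAltKeys option_index sn) nxt) [(rem.length : Int)] := by
  induction seq with
  | nil => rfl
  | cons sn rest ih =>
    rw [pvAltGo, ih, List.foldr_cons]
    by_cases hn : rest.foldr (fun sn nxt => pvAltLevel rem (pvAltKeys option_index sn) nxt) [(rem.length : Int)] = []
    · rw [hn]
      simp [pvAltLevel]
    · rw [if_neg (by simpa [List.isEmpty_iff] using hn)]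

-- A's opts dict contains a key iff it is the uppercase of some option value
lemma pv_contains_upperDict (vals : List String) (h : List Char) :
    (pvUpperDict vals).contains h = true ↔ h ∈ vals.map (fun v => PySem.Chars.upper v.toList) := by
  unfold pvUpperDict
  rw [PySem.Dict.contains_iff_mem_keys, PySem.Dict.keys_foldl_insert_key]
  have : (PySem.Dict.empty : PySem.Dict (List Char) String).keys = [] := rfl
  rw [this]
  rw [show PySem.Set.update ([] : PySem.Set (List Char)) (vals.map (fun v => PySem.Chars.upper v.toList)) = PySem.Set.ofList (vals.map (fun v => PySem.Chars.upper v.toList)) from rfl]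
  exact PySem.Set.mem_ofList _ _

-- B's key set holds exactly the nonempty uppercased option values
lemma pv_mem_altKeys (option_index : List (String × List String)) (sn : String) (h : List Char) :
    h ∈ pvAltKeys option_index sn ↔
      h ∈ ((PySem.Dict.mk option_index).getD sn []).map (fun v => PySem.Chars.upper v.toList) ∧ h ≠ [] := by
  unfold pvAltKeys
  rw [PySem.Set.mem_ofList]
  simp only [List.mem_map, List.mem_filter]
  constructor
  · rintro ⟨v, ⟨hv, hne⟩, rfl⟩
    refine ⟨⟨v, hv, rfl⟩, ?_⟩
    simp only [ne_eq, PySem.Chars.upper, List.map_eq_nil_iff, String.toList_eq_nil_iff]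
    simpa using hne
  · rintro ⟨⟨v, hv, rfl⟩, hne⟩
    refine ⟨v, ⟨hv, ?_⟩, rfl⟩
    simp only [bne_iff_ne, ne_eq]
    intro hc
    subst hc
    simp [PySem.Chars.upper] at hne

-- the central invariant: A's recursion at (i, rem.drop p) answers membership of p in B's DP level i
lemma pv_core_eq_reach (slot_names : List String) (option_index : List (String × List String)) (rem : List Char) :
    ∀ (k : Nat) (i : Int), -(slot_names.length : Int) ≤ i → i ≤ (slot_names.length : Int) → ((slot_names.length : Int) - i).toNat = k →
    ∀ (p : Nat), p ≤ rem.length →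
    pvMatchACore slot_names option_index i (rem.drop p) =
      (((PySem.List.pyRange i (slot_names.length : Int) 1).map
          (fun j => (PySem.List.pyGet? slot_names j).getD "")).foldr
        (fun sn nxt => pvAltLevel rem (pvAltKeys option_index sn) nxt)
        [(rem.length : Int)]).contains (p : Int) := by
  intro k
  induction k with
  | zero =>
    intro i h0 h1 hk p hp
    have hi : i = (slot_names.length : Int) := by omega
    rw [pvMatchACore, if_pos hi, PySem.List.pyRange_one_eq_nil (le_of_eq hi.symm)]
    simp only [List.map_nil, List.foldr_nil]
    rw [Bool.eq_iff_iff]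
    simp only [beq_iff_eq, List.drop_eq_nil_iff, List.contains_iff_mem, List.mem_singleton]
    omega
  | succ k ih =>
    intro i h0 h1 hk p hp
    have hi : i < (slot_names.length : Int) := by omega
    rw [pvMatchACore, if_neg (by omega)]
    rw [PySem.List.pyRange_one_cons hi]
    simp only [List.map_cons, List.foldr_cons]
    split
    · next hnone =>
      rw [PySem.List.pyGet?_eq_none_iff] at hnone
      exact absurd (⟨h0, hi⟩ : PySem.Raise.InRange slot_names.length i) hnone
    · next sn hget =>
      rw [Bool.eq_iff_iff]
      rw [List.contains_iff_mem, pv_mem_altLevel]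
      simp only [List.any_eq_true, List.mem_attach, true_and, Subtype.exists,
        Bool.and_eq_true, hget, Option.getD_some]
      have hIH : ∀ q : Nat, q ≤ rem.length →
          (pvMatchACore slot_names option_index (i + 1) (rem.drop q) = true ↔
            (q : Int) ∈ List.foldr (fun sn nxt => pvAltLevel rem (pvAltKeys option_index sn) nxt)
              [(rem.length : Int)]
              (List.map (fun j => (PySem.List.pyGet? slot_names j).getD "")
                (PySem.List.pyRange (i + 1) (slot_names.length : Int))) ) := by
        intro q hq
        rw [ih (i + 1) (by omega) (by omega) (by omega) q hq, List.contains_iff_mem]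
      constructor
      · rintro ⟨a, ha, hcont, hrec⟩
        rw [PySem.List.len_eq, List.length_drop, pv_mem_pyRange_neg_one] at ha
        obtain ⟨ha0, ha1⟩ := ha
        have hla1 : 1 ≤ a.toNat := by omega
        have hla2 : a.toNat ≤ rem.length - p := by omega
        set la := a.toNat with hla
        have hhead : PySem.List.slice (List.drop p rem) none (some a) = List.take la (List.drop p rem) := by
          rw [PySem.List.slice_to _ (by omega)]
        rw [hhead] at hcont
        have hheadlen : (List.take la (List.drop p rem)).length = la := by
          simp [List.length_take, List.length_drop]; omega
        have hkeymem : List.take la (List.drop p rem) ∈ pvAltKeys option_index sn := by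
          rw [pv_mem_altKeys]
          refine ⟨(pv_contains_upperDict _ _).mp hcont, ?_⟩
          intro hnil
          rw [hnil] at hheadlen
          simp at hheadlen
          omega
        have hqmem : ((p + la : Nat) : Int) ∈ List.foldr (fun sn nxt => pvAltLevel rem (pvAltKeys option_index sn) nxt)
            [(rem.length : Int)]
            (List.map (fun j => (PySem.List.pyGet? slot_names j).getD "")
              (PySem.List.pyRange (i + 1) (slot_names.length : Int))) := by
          rw [← hIH (p + la) (by omega)]
          rw [PySem.List.slice_from _ (by omega)] at hrec
          rw [show a.toNat = la from rfl, List.drop_drop] at hrec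
          exact hrec
        refine ⟨((p + la : Nat) : Int), hqmem, List.take la (List.drop p rem), hkeymem, ⟨?_, ?_⟩, ?_⟩
        · rw [hheadlen]; push_cast; omega
        · rw [hheadlen]
          have : (((p + la : Nat) : Int) - (la : Int)).toNat = p := by omega
          rw [this]
          exact List.take_prefix _ _
        · rw [hheadlen]; push_cast; omega
      · rintro ⟨q, hq, key, hkey, ⟨hge, hpre⟩, hpq⟩
        rw [pv_mem_altKeys] at hkey
        obtain ⟨hkmem, hknil⟩ := hkey
        have hklen : 1 ≤ key.length := by
          cases key with
          | nil => exact absurd rfl hknil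
          | cons c cs => simp
        have hbound := pv_reach_bounds hq
        have hqp : q = (p : Int) + (key.length : Int) := by omega
        have hble : p + key.length ≤ rem.length := by omega
        have htn : (q - (key.length : Int)).toNat = p := by omega
        rw [htn] at hpre
        have hheadeq : List.take key.length (List.drop p rem) = key := by
          have := List.prefix_iff_eq_take.mp hpre
          exact this.symm
        refine ⟨(key.length : Int), ?_, ?_, ?_⟩
        · rw [PySem.List.len_eq, List.length_drop, pv_mem_pyRange_neg_one]
          omega
        · rw [PySem.List.slice_to _ (by omega)]
          rw [show ((key.length : Int)).toNat = key.length from by omega, hheadeq]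
          exact (pv_contains_upperDict _ _).mpr hkmem
        · rw [PySem.List.slice_from _ (by omega)]
          rw [show ((key.length : Int)).toNat = key.length from by omega, List.drop_drop]
          rw [hIH (p + key.length) (by omega)]
          rw [show ((p + key.length : Nat) : Int) = q from by omega]
          exact hq

-- ===== VERDICT (by name: the statement is the Claim_ definition above) =====
theorem match_adjacent_recursive_py_spec : Claim_equal_match_adjacent_recursive_py := by
  intro slot_names idx remaining option_index selections _hdom hpre
  unfold Spec_match_adjacent_recursive_py match_adjacent_recursive_py match_adjacent_recursive_py_alt
  obtain ⟨h0, h1, -⟩ := hpre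
  have h := pv_core_eq_reach slot_names option_index remaining.toList
    ((slot_names.length : Int) - idx).toNat idx h0 h1 rfl 0 (Nat.zero_le _)
  simpa [pv_altGo_eq_foldr] using h
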